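-- pv_equiv track=rewrite | github.com/wxiaojie/Question-answer-Generation-from-Chest-X-ray-Reports | utils.py | deletenoise
-- ===== SOURCE A (Python) =====
-- noise = ['and', ',', 'or', 'in']
--
-- def deletenoise(s_line, p_line):
--     while len(s_line) > 0 and noise.count(s_line[-1]) > 0:
--         s_line = s_line[:-1]
--         p_line = p_line[:-1]
--     while len(s_line) > 0 and noise.count(s_line[0]) > 0:
--         s_line = s_line[1:]
--         p_line = p_line[1:]
--     return s_line, p_line
-- ===== SOURCE B (Python) =====
-- noise = ['and', ',', 'or', 'in']
--
-- def cut(lst, head, tail):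
--     """Drop head items from the front and tail items from the back (empty if fewer remain)."""
--     return lst[head:max(len(lst) - tail, 0)]
--
-- def deletenoise(s_line, p_line):
--     tail = 0
--     while tail < len(s_line) and s_line[len(s_line) - 1 - tail] in noise:
--         tail += 1
--     head = 0
--     while head < len(s_line) - tail and s_line[head] in noise:
--         head += 1
--     return cut(s_line, head, tail), cut(p_line, head, tail)
-- ===== Notes on version B (the rewrite author's own statement) =====
-- stated objective: alternative
-- what changed: A repeatedly re-slices (copies) both lists while popping boundary noise tokens one at a time; B only counts the trailing and leading noise tokens of s_line with two index scans and then cuts those counts off both parallel lists with a single slice each.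
import Mathlib
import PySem

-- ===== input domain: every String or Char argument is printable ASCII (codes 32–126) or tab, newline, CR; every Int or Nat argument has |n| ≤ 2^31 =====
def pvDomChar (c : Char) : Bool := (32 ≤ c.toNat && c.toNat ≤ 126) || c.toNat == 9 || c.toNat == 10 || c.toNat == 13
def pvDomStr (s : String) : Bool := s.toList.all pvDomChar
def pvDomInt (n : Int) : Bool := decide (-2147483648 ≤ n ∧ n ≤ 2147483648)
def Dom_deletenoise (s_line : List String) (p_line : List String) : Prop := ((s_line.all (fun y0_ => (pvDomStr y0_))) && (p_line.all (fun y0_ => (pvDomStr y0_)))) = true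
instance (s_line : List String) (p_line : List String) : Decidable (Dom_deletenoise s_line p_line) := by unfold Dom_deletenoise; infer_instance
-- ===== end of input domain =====

-- B replaces A's repeated list re-slicing while popping noise tokens by two index scans
-- that count the boundary noise tokens of s_line, then one cut (slice) of each list.

def pyNoise : List String := ["and", ",", "or", "in"]

-- ===== PORT A =====
-- first while loop: pop trailing noise tokens from both lists
def dnLoop1 (s p : List String) : List String × List String :=
  if _h : 0 < s.length ∧ 0 < pyNoise.count (s.getLast?.getD "") then
    dnLoop1 s.dropLast p.dropLast
  else (s, p)
termination_by s.length
decreasing_by simp [List.length_dropLast]; omega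

-- second while loop: pop leading noise tokens from both lists
def dnLoop2 (s p : List String) : List String × List String :=
  if _h : 0 < s.length ∧ 0 < pyNoise.count (s.headD "") then
    dnLoop2 s.tail p.tail
  else (s, p)
termination_by s.length
decreasing_by simp [List.length_tail]; omega

def deletenoise (s_line : List String) (p_line : List String) : List String × List String :=
  let r := dnLoop1 s_line p_line
  dnLoop2 r.1 r.2

-- ===== PORT B =====
-- count the trailing noise tokens of s
def dnTail (s : List String) (t : Nat) : Nat :=
  if h : t < s.length ∧ s.getD (s.length - 1 - t) "" ∈ pyNoise then dnTail s (t + 1) else t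
termination_by s.length - t
decreasing_by omega

-- count the leading noise tokens of s (below the tail cut)
def dnHead (s : List String) (tail head : Nat) : Nat :=
  if h : head < s.length - tail ∧ s.getD head "" ∈ pyNoise then dnHead s tail (head + 1) else head
termination_by s.length - tail - head
decreasing_by omega

-- cut head items from the front and tail items from the back
-- (Python's lst[head:max(len(lst)-tail,0)]; Nat subtraction is exactly the max-with-0)
def dnCut (lst : List String) (head tail : Nat) : List String :=
  (lst.take (lst.length - tail)).drop head

def deletenoise_alt (s_line : List String) (p_line : List String) : List String × List String :=
  let tail := dnTail s_line 0
  let head := dnHead s_line tail 0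
  (dnCut s_line head tail, dnCut p_line head tail)

-- ===== PRECONDITION & SPEC =====
def Spec_deletenoise (s_line : List String) (p_line : List String) (out : List String × List String) : Prop := out = deletenoise_alt s_line p_line
instance (s_line : List String) (p_line : List String) (out : List String × List String) : Decidable (Spec_deletenoise s_line p_line out) := by unfold Spec_deletenoise; infer_instance

-- ===== CLAIM (what is proved, stated in full; the proofs are below) =====
def Claim_equal_deletenoise : Prop := ∀ (s_line : List String) (p_line : List String), Dom_deletenoise s_line p_line → Spec_deletenoise s_line p_line (deletenoise s_line p_line)

-- ===== LEMMAS AND PROOFS =====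
-- proof-layer view of A's first loop: the index where the trailing noise run starts
def dnHi (s : List String) (hi : Nat) : Nat :=
  if h : 0 < hi ∧ s.getD (hi - 1) "" ∈ pyNoise then dnHi s (hi - 1) else hi
termination_by hi
decreasing_by omega

-- proof-layer view of A's second loop: the index past the leading noise run
def dnLo (s : List String) (hi lo : Nat) : Nat :=
  if h : lo < hi ∧ s.getD lo "" ∈ pyNoise then dnLo s hi (lo + 1) else lo
termination_by hi - lo
decreasing_by omega

theorem dnHi_unfold (s : List String) (n : Nat) :
    dnHi s n = if 0 < n ∧ s.getD (n - 1) "" ∈ pyNoise then dnHi s (n - 1) else n := by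
  rw [dnHi.eq_def]; split <;> rfl

theorem dnLo_unfold (s : List String) (hi lo : Nat) :
    dnLo s hi lo = if lo < hi ∧ s.getD lo "" ∈ pyNoise then dnLo s hi (lo + 1) else lo := by
  rw [dnLo.eq_def]; split <;> rfl

theorem dnHi_le (s : List String) (n : Nat) : dnHi s n ≤ n := by
  fun_induction dnHi s n with
  | case1 m h ih => omega
  | case2 m h => omega

theorem getD_take (s : List String) (n i : Nat) (hi : i < n) :
    (s.take n).getD i "" = s.getD i "" := by
  simp [List.getD, hi]

theorem getD_dropLast (s : List String) (i : Nat) (hi : i < s.length - 1) :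
    s.dropLast.getD i "" = s.getD i "" := by
  rw [List.dropLast_eq_take]; exact getD_take s _ i hi

theorem dnHi_dropLast (s : List String) (m : Nat) (hm : m ≤ s.length - 1) :
    dnHi s.dropLast m = dnHi s m := by
  fun_induction dnHi s.dropLast m with
  | case1 m h ih =>
      have hg : s.getD (m - 1) "" ∈ pyNoise := by
        rw [← getD_dropLast s (m - 1) (by omega)]; exact h.2
      rw [dnHi_unfold s m, if_pos ⟨h.1, hg⟩]
      exact ih (by omega)
  | case2 m h =>
      rw [dnHi_unfold s m, if_neg]
      rintro ⟨h1, h2⟩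
      exact h ⟨h1, by rw [getD_dropLast s (m - 1) (by omega)]; exact h2⟩

theorem dnLoop1_eq (s p : List String) :
    dnLoop1 s p = (s.take (dnHi s s.length),
                   p.take (p.length - (s.length - dnHi s s.length))) := by
  fun_induction dnLoop1 s p with
  | case1 s p h ih =>
      obtain ⟨hlen, hcnt⟩ := h
      rw [List.count_pos_iff, List.getLast?_eq_getElem?] at hcnt
      have hget : s.getD (s.length - 1) "" ∈ pyNoise := by
        simpa [List.getD] using hcnt
      have hhi : dnHi s s.length = dnHi s (s.length - 1) := by
        rw [dnHi_unfold s s.length, if_pos ⟨hlen, hget⟩]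
      have hle : dnHi s (s.length - 1) ≤ s.length - 1 := dnHi_le _ _
      rw [ih, List.length_dropLast, List.length_dropLast,
          dnHi_dropLast s (s.length - 1) le_rfl, hhi, Prod.mk.injEq]
      refine ⟨?_, ?_⟩
      · rw [List.dropLast_eq_take, List.take_take, min_eq_left hle]
      · rw [List.dropLast_eq_take, List.take_take]
        congr 1
        omega
  | case2 s p h =>
      have hhi : dnHi s s.length = s.length := by
        rw [dnHi_unfold s s.length, if_neg]
        rintro ⟨hlen, hmem⟩
        apply h
        refine ⟨hlen, ?_⟩
        rw [List.count_pos_iff, List.getLast?_eq_getElem?]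
        simpa [List.getD] using hmem
      simp [hhi]

theorem dnLo_cons (x : String) (t : List String) (hi lo : Nat) :
    dnLo (x :: t) (hi + 1) (lo + 1) = dnLo t hi lo + 1 := by
  fun_induction dnLo t hi lo with
  | case1 lo h ih =>
      rw [dnLo_unfold (x :: t) (hi + 1) (lo + 1),
          if_pos ⟨by omega, by simpa [List.getD] using h.2⟩]
      exact ih
  | case2 lo h =>
      rw [dnLo_unfold (x :: t) (hi + 1) (lo + 1), if_neg]
      rintro ⟨h1, h2⟩
      exact h ⟨by omega, by simpa [List.getD] using h2⟩

theorem dnLoop2_eq (s p : List String) :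
    dnLoop2 s p = (s.drop (dnLo s s.length 0), p.drop (dnLo s s.length 0)) := by
  fun_induction dnLoop2 s p with
  | case1 s p h ih =>
      obtain ⟨hlen, hcnt⟩ := h
      rw [List.count_pos_iff] at hcnt
      obtain ⟨x, t, rfl⟩ := List.exists_cons_of_ne_nil (List.ne_nil_of_length_pos hlen)
      have hmem : x ∈ pyNoise := by simpa using hcnt
      have hlo : dnLo (x :: t) (x :: t).length 0 = dnLo t t.length 0 + 1 := by
        rw [dnLo_unfold (x :: t) (x :: t).length 0,
            if_pos ⟨by simp, by simpa [List.getD] using hmem⟩]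
        exact dnLo_cons x t t.length 0
      rw [ih, hlo]
      simp
  | case2 s p h =>
      have hlo : dnLo s s.length 0 = 0 := by
        rw [dnLo_unfold s s.length 0, if_neg]
        rintro ⟨hlen, hmem⟩
        apply h
        refine ⟨hlen, ?_⟩
        rw [List.count_pos_iff]
        obtain ⟨x, t, rfl⟩ := List.exists_cons_of_ne_nil (List.ne_nil_of_length_pos hlen)
        simpa [List.getD] using hmem
      simp [hlo]

theorem dnLo_take (s : List String) (hi lo : Nat) :
    dnLo (s.take hi) hi lo = dnLo s hi lo := by
  fun_induction dnLo s hi lo with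
  | case1 lo h ih =>
      rw [dnLo_unfold (s.take hi) hi lo,
          if_pos ⟨h.1, by rw [getD_take s hi lo h.1]; exact h.2⟩]
      exact ih
  | case2 lo h =>
      rw [dnLo_unfold (s.take hi) hi lo, if_neg]
      rintro ⟨h1, h2⟩
      exact h ⟨h1, by rw [getD_take s hi lo h1] at h2; exact h2⟩

-- B's tail count is the mirror of A's hi pointer
theorem dnTail_dnHi (s : List String) (t : Nat) (ht : t ≤ s.length) :
    dnTail s t ≤ s.length ∧ dnHi s (s.length - t) = s.length - dnTail s t := by
  fun_induction dnTail s t with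
  | case1 t h ih =>
      have hcond : 0 < s.length - t ∧ s.getD (s.length - t - 1) "" ∈ pyNoise := by
        refine ⟨by omega, ?_⟩
        have : s.length - t - 1 = s.length - 1 - t := by omega
        rw [this]; exact h.2
      have hstep : dnHi s (s.length - t) = dnHi s (s.length - (t + 1)) := by
        rw [dnHi_unfold s (s.length - t), if_pos hcond]
        congr 1
      obtain ⟨h1, h2⟩ := ih (by omega)
      exact ⟨h1, hstep.trans h2⟩
  | case2 t h =>
      refine ⟨ht, ?_⟩
      rw [dnHi_unfold s (s.length - t), if_neg]
      rintro ⟨h1, h2⟩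
      apply h
      refine ⟨by omega, ?_⟩
      have : s.length - 1 - t = s.length - t - 1 := by omega
      rw [this]; exact h2

-- B's head count is A's lo pointer with hi = length - tail
theorem dnHead_dnLo (s : List String) (tail head : Nat) :
    dnHead s tail head = dnLo s (s.length - tail) head := by
  fun_induction dnHead s tail head with
  | case1 head h ih =>
      rw [dnLo_unfold s (s.length - tail) head, if_pos h, ih]
  | case2 head h =>
      rw [dnLo_unfold s (s.length - tail) head, if_neg h]

-- ===== VERDICT (by name: the statement is the Claim_ definition above) =====
theorem deletenoise_spec : Claim_equal_deletenoise := by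
  intro s p _
  unfold Spec_deletenoise deletenoise deletenoise_alt dnCut
  obtain ⟨htle, hhi0⟩ := dnTail_dnHi s 0 (Nat.zero_le _)
  simp only [Nat.sub_zero] at hhi0
  have hle : dnHi s s.length ≤ s.length := dnHi_le _ _
  have htail : dnTail s 0 = s.length - dnHi s s.length := by omega
  simp only [dnLoop1_eq, dnLoop2_eq, dnHead_dnLo, htail]
  have hlen : (List.take (dnHi s s.length) s).length = dnHi s s.length := by simp; omega
  have h1 : s.length - (s.length - dnHi s s.length) = dnHi s s.length := by omega
  simp only [hlen, h1, dnLo_take]
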